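-- pv_equiv track=rewrite | github.com/flux7200/inf-esoteric-language | main.py | get_usable_chars
-- ===== SOURCE A (Python) =====
-- def get_usable_chars(program):
--     chars = []
--
--     for line in program.split('\n'):
--         for char in line:
--             if char == "I":
--                 chars.append("I")
--
--             elif char == "N":
--                 chars.append("N")
--
--             elif char == "F":
--                 chars.append("F")
--
--             elif char == "%":
--                 break
--
--     return chars
-- ===== SOURCE B (Python) =====
-- def get_usable_chars(program):
--     chars = []
--     skip = False
--     for ch in program:
--         if ch == '\n':
--             skip = False
--         elif skip:
--             pass
--         elif ch == '%':
--             skip = True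
--         elif ch == 'I' or ch == 'N' or ch == 'F':
--             chars.append(ch)
--     return chars
-- ===== Notes on version B (the rewrite author's own statement) =====
-- stated objective: alternative
-- what changed: Replaces A's split-into-lines plus per-line scan with early break by a single left-to-right finite-state machine over the raw string: a skip flag is set at the comment marker and cleared at each newline, so the string is never split and no inner loop or break exists.
import Mathlib
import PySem

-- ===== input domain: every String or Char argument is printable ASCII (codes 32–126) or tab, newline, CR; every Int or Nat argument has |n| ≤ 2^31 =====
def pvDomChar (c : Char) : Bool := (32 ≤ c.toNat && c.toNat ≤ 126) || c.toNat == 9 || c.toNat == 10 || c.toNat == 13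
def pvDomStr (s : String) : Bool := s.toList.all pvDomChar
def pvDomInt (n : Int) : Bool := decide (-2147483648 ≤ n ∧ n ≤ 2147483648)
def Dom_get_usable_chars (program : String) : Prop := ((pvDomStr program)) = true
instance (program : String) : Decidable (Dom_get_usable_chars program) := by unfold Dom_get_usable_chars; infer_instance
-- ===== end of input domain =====

-- B replaces A's split-into-lines + per-line break scan by one finite-state pass over the raw string (a skip flag set at the comment marker and cleared at newline); same result, same cost.
-- ===== PORT A =====
-- inner 'for char in line' loop with its if/elif chain and break
def pvScanLineA : List String → List Char → List String
  | chars, [] => chars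
  | chars, c :: rest =>
    if c = 'I' then pvScanLineA (chars ++ ["I"]) rest
    else if c = 'N' then pvScanLineA (chars ++ ["N"]) rest
    else if c = 'F' then pvScanLineA (chars ++ ["F"]) rest
    else if c = '%' then chars
    else pvScanLineA chars rest

def get_usable_chars (program : String) : List String :=
  (PySem.Chars.splitOn program.toList ['\n']).foldl (fun chars line => pvScanLineA chars line) []

-- ===== PORT B =====
-- one step of B's state machine: state = (chars, skip)
def pvStepB (st : List String × Bool) (c : Char) : List String × Bool :=
  if c = '\n' then (st.1, false)
  else if st.2 then st
  else if c = '%' then (st.1, true)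
  else if c = 'I' ∨ c = 'N' ∨ c = 'F' then (st.1 ++ [String.mk [c]], st.2)
  else st

def get_usable_chars_alt (program : String) : List String :=
  (program.toList.foldl pvStepB ([], false)).1

-- ===== PRECONDITION & SPEC =====
def Spec_get_usable_chars (program : String) (out : List String) : Prop := out = get_usable_chars_alt program
instance (program : String) (out : List String) : Decidable (Spec_get_usable_chars program out) := by unfold Spec_get_usable_chars; infer_instance

-- ===== CLAIM (what is proved, stated in full; the proofs are below) =====
def Claim_equal_get_usable_chars : Prop := ∀ (program : String), Dom_get_usable_chars program → Spec_get_usable_chars program (get_usable_chars program)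

-- ===== LEMMAS AND PROOFS =====

-- structural reformulation of splitOn on '\n' (proof-side only)
def pvMySplit : List Char → List (List Char)
  | [] => [[]]
  | c :: rest =>
    if c = '\n' then [] :: pvMySplit rest
    else
      match pvMySplit rest with
      | [] => [[c]]
      | h :: t => (c :: h) :: t

theorem pvMySplit_ne_nil (l : List Char) : pvMySplit l ≠ [] := by
  cases l with
  | nil => simp [pvMySplit]
  | cons c rest =>
    simp only [pvMySplit]
    split
    · simp
    · split <;> simp_all

-- consHead x prepends x to the head piece
def pvConsHead (x : List Char) : List (List Char) → List (List Char)
  | [] => [x]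
  | h :: t => (x ++ h) :: t

theorem pvGo_spec (fuel : Nat) (l cur : List Char) (acc : List (List Char))
    (hf : l.length ≤ fuel) :
    PySem.Chars.splitOn.go ['\n'] fuel l cur acc =
      acc.reverse ++ pvConsHead cur.reverse (pvMySplit l) := by
  induction fuel generalizing l cur acc with
  | zero =>
    cases l with
    | nil => simp [PySem.Chars.splitOn.go, pvMySplit, pvConsHead]
    | cons c rest => simp at hf
  | succ f ih =>
    cases l with
    | nil => simp [PySem.Chars.splitOn.go, pvMySplit, pvConsHead]
    | cons c rest =>
      by_cases hc : c = '\n'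
      · subst hc
        have hpre : List.isPrefixOf ['\n'] ('\n' :: rest) = true := by
          simp [List.isPrefixOf]
        rw [show PySem.Chars.splitOn.go ['\n'] (f+1) ('\n' :: rest) cur acc =
              PySem.Chars.splitOn.go ['\n'] f (List.drop 1 ('\n' :: rest)) []
                (cur.reverse :: acc) by
              simp [PySem.Chars.splitOn.go, hpre]]
        simp only [List.drop_succ_cons, List.drop_zero]
        rw [ih rest [] (cur.reverse :: acc) (by simpa using Nat.le_of_succ_le_succ hf)]
        have := pvMySplit_ne_nil rest
        cases hm : pvMySplit rest with
        | nil => exact absurd hm this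
        | cons h t => simp [pvMySplit, pvConsHead, hm]
      · have hpre : List.isPrefixOf ['\n'] (c :: rest) = false := by
          simp [List.isPrefixOf]; intro h; exact hc h.symm
        rw [show PySem.Chars.splitOn.go ['\n'] (f+1) (c :: rest) cur acc =
              PySem.Chars.splitOn.go ['\n'] f rest (c :: cur) acc by
              simp [PySem.Chars.splitOn.go, hpre]]
        rw [ih rest (c :: cur) acc (by simpa using Nat.le_of_succ_le_succ hf)]
        have := pvMySplit_ne_nil rest
        cases hm : pvMySplit rest with
        | nil => exact absurd hm this
        | cons h t => simp [pvMySplit, pvConsHead, hm, hc]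

theorem pvSplitOn_eq (l : List Char) :
    PySem.Chars.splitOn l ['\n'] = pvMySplit l := by
  unfold PySem.Chars.splitOn
  rw [pvGo_spec _ _ _ _ (by omega)]
  have := pvMySplit_ne_nil l
  cases hm : pvMySplit l with
  | nil => exact absurd hm this
  | cons h t => simp [pvConsHead, hm]

-- the FSM of B, run from either skip state, computes A's line-by-line fold
theorem pvFsm_spec (l : List Char) : ∀ acc : List String,
    (l.foldl pvStepB (acc, false)).1 = (pvMySplit l).foldl pvScanLineA acc ∧
    (l.foldl pvStepB (acc, true)).1 = (pvMySplit l).tail.foldl pvScanLineA acc := by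
  induction l with
  | nil => intro acc; simp [pvMySplit, pvScanLineA]
  | cons c rest ih =>
    intro acc
    by_cases hnl : c = '\n'
    · subst hnl
      constructor
      · rw [List.foldl_cons, show pvStepB (acc, false) '\n' = (acc, false) by
          simp [pvStepB], (ih acc).1]
        simp [pvMySplit, pvScanLineA]
      · rw [List.foldl_cons, show pvStepB (acc, true) '\n' = (acc, false) by
          simp [pvStepB], (ih acc).1]
        simp [pvMySplit]
    · have hne := pvMySplit_ne_nil rest
      obtain ⟨h, t, hm⟩ : ∃ h t, pvMySplit rest = h :: t := by
        cases hm : pvMySplit rest with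
        | nil => exact absurd hm hne
        | cons h t => exact ⟨h, t, rfl⟩
      have hsplit : pvMySplit (c :: rest) = (c :: h) :: t := by
        simp [pvMySplit, hnl, hm]
      constructor
      · by_cases hpc : c = '%'
        · subst hpc
          rw [List.foldl_cons, show pvStepB (acc, false) '%' = (acc, true) by
            simp [pvStepB], (ih acc).2, hm, hsplit]
          simp [pvScanLineA]
        · by_cases hin : c = 'I' ∨ c = 'N' ∨ c = 'F'
          · rw [List.foldl_cons, show pvStepB (acc, false) c =
                (acc ++ [String.mk [c]], false) by
              simp [pvStepB, hnl, hpc, hin],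
              (ih (acc ++ [String.mk [c]])).1, hm, hsplit]
            rcases hin with h1 | h1 | h1 <;> subst h1
            · rw [show (String.mk ['I'] : String) = "I" from by decide]
              simp [pvScanLineA]
            · rw [show (String.mk ['N'] : String) = "N" from by decide]
              simp [pvScanLineA]
            · rw [show (String.mk ['F'] : String) = "F" from by decide]
              simp [pvScanLineA]
          · rw [List.foldl_cons, show pvStepB (acc, false) c = (acc, false) by
              simp [pvStepB, hnl, hpc, hin], (ih acc).1, hm, hsplit]
            push_neg at hin
            simp [List.foldl_cons, pvScanLineA, hpc, hin.1, hin.2.1, hin.2.2]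
      · rw [List.foldl_cons, show pvStepB (acc, true) c = (acc, true) by
          simp [pvStepB, hnl], (ih acc).2, hm, hsplit]
        simp

-- ===== VERDICT (by name: the statement is the Claim_ definition above) =====
theorem get_usable_chars_spec : Claim_equal_get_usable_chars := by
  intro program _
  show get_usable_chars program = get_usable_chars_alt program
  unfold get_usable_chars get_usable_chars_alt
  rw [pvSplitOn_eq, ← (pvFsm_spec program.toList []).1]
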